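-- pv_equiv track=rewrite | github.com/Weiyu1105/csv2spotify_playlist | classify_pick_and_merge.py | vote_lang_by_yaml
-- ===== SOURCE A (Python) =====
-- from typing import Dict, List, Set, Optional
-- from collections import Counter
--
-- def vote_lang_by_yaml(artists: List[str], artist_map: Dict[str, str]) -> Optional[str]:
--     votes: List[str] = []
--     for a in artists:
--         for key, lang in artist_map.items():
--             if key.lower() in a.lower():
--                 votes.append(lang)
--                 break
--     if not votes:
--         return None
--     uniq = set(votes)
--     if len(uniq) == 1:
--         return votes[0]
--     c = Counter(votes)
--     lang, cnt = c.most_common(1)[0]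
--     if cnt >= 2 and cnt > (len(votes) - cnt):
--         return lang
--     return None
-- ===== SOURCE B (Python) =====
-- def vote_lang_by_yaml(artists, artist_map):
--     votes = []
--     for a in artists:
--         for key, lang in artist_map.items():
--             if key.lower() in a.lower():
--                 votes.append(lang)
--                 break
--     if not votes:
--         return None
--     # Boyer-Moore majority vote over the collected votes, then a strict-majority recount.
--     candidate, count = None, 0
--     for v in votes:
--         if count == 0:
--             candidate, count = v, 1
--         elif v == candidate:
--             count += 1
--         else:
--             count -= 1
--     if 2 * votes.count(candidate) > len(votes):
--         return candidate
--     return None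
-- ===== Notes on version B (the rewrite author's own statement) =====
-- stated objective: alternative
-- what changed: The Counter/set/most_common decision over the collected votes is replaced by a single Boyer-Moore majority-vote pass plus a strict-majority recount; the substring vote-gathering loop is unchanged.
import Mathlib
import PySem

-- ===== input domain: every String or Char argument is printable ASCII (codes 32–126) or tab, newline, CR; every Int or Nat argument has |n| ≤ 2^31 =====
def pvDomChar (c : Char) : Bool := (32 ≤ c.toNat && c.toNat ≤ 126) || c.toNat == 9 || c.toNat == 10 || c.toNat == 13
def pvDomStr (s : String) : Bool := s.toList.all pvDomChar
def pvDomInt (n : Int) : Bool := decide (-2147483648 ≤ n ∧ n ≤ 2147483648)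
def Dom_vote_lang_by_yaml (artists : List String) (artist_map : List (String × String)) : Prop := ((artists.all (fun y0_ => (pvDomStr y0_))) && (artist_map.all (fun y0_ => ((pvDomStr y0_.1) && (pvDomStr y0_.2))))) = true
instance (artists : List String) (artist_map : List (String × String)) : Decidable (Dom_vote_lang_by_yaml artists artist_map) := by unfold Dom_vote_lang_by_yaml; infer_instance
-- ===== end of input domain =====

-- B replaces the Counter/most_common plurality decision with a Boyer-Moore majority-vote
-- pass plus a strict-majority recount (objective: alternative; the vote-gathering loop is
-- identical in both Pythons and is shared here as pvVotes).

-- ===== PORT A =====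
-- inner 'for key, lang in artist_map.items(): if key.lower() in a.lower(): … break'
def pvFindVote (a : String) : List (String × String) → Option String
  | [] => none
  | (key, lang) :: rest =>
      if PySem.Str.isIn (PySem.Str.lower key) (PySem.Str.lower a) then some lang
      else pvFindVote a rest

-- the vote-gathering loop, identical in both Python sources
def pvVotes (artists : List String) (artist_map : List (String × String)) : List String :=
  artists.foldl (fun acc a =>
    match pvFindVote a artist_map with
    | some lang => acc ++ [lang]
    | none => acc) []

def vote_lang_by_yaml (artists : List String) (artist_map : List (String × String)) : Option String :=
  let votes := pvVotes artists artist_map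
  if votes = [] then none
  else
    let uniq := PySem.Set.ofList votes
    if uniq.length = 1 then
      some (PySem.List.pyGetD votes 0 "")   -- votes[0]; exact: this branch has votes ≠ []
    else
      let c := PySem.Dict.counter votes
      -- c.most_common(1)[0] = head of items sorted by count, descending, stable
      match PySem.List.sorted c.items (fun p => p.2) true with
      | [] => none                           -- unreachable: votes ≠ []
      | (lang, cnt) :: _ =>
          if 2 ≤ cnt ∧ (votes.length : Int) - cnt < cnt then some lang else none

-- ===== PORT B =====
-- one Boyer-Moore step: state = (candidate, count)
def pvBmStep (st : Option String × Int) (v : String) : Option String × Int :=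
  if st.2 = 0 then (some v, 1)
  else if some v = st.1 then (st.1, st.2 + 1)
  else (st.1, st.2 - 1)

def vote_lang_by_yaml_alt (artists : List String) (artist_map : List (String × String)) : Option String :=
  let votes := pvVotes artists artist_map
  if votes = [] then none
  else
    let st := votes.foldl pvBmStep (none, 0)
    match st.1 with
    | none => none                           -- unreachable: votes ≠ []
    | some c =>
        if 2 * (votes.count c : Int) > (votes.length : Int) then some c else none

-- ===== PRECONDITION & SPEC =====
def Spec_vote_lang_by_yaml (artists : List String) (artist_map : List (String × String)) (out : Option String) : Prop := out = vote_lang_by_yaml_alt artists artist_map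
instance (artists : List String) (artist_map : List (String × String)) (out : Option String) : Decidable (Spec_vote_lang_by_yaml artists artist_map out) := by unfold Spec_vote_lang_by_yaml; infer_instance

-- ===== CLAIM (what is proved, stated in full; the proofs are below) =====
def Claim_equal_vote_lang_by_yaml : Prop := ∀ (artists : List String) (artist_map : List (String × String)), Dom_vote_lang_by_yaml artists artist_map → Spec_vote_lang_by_yaml artists artist_map (vote_lang_by_yaml artists artist_map)

-- ===== LEMMAS AND PROOFS =====

-- A's decision step, as a function of the collected votes
def pvDecA (votes : List String) : Option String :=
  if votes = [] then none
  else
    if (PySem.Set.ofList votes).length = 1 then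
      some (PySem.List.pyGetD votes 0 "")
    else
      match PySem.List.sorted (PySem.Dict.counter votes).items (fun p => p.2) true with
      | [] => none
      | (lang, cnt) :: _ =>
          if 2 ≤ cnt ∧ (votes.length : Int) - cnt < cnt then some lang else none

-- B's decision step, as a function of the collected votes
def pvDecB (votes : List String) : Option String :=
  if votes = [] then none
  else
    match (votes.foldl pvBmStep (none, 0)).1 with
    | none => none
    | some c =>
        if 2 * (votes.count c : Int) > (votes.length : Int) then some c else none

theorem pvDecA_eq (artists : List String) (artist_map : List (String × String)) :
    vote_lang_by_yaml artists artist_map = pvDecA (pvVotes artists artist_map) := rfl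

theorem pvDecB_eq (artists : List String) (artist_map : List (String × String)) :
    vote_lang_by_yaml_alt artists artist_map = pvDecB (pvVotes artists artist_map) := rfl

-- two distinct values cannot both occupy more than half of the list
theorem pv_count_add_count_le (l : List String) (x y : String) (h : x ≠ y) :
    l.count x + l.count y ≤ l.length := by
  induction l with
  | nil => simp
  | cons v t ih =>
    simp only [List.count_cons, List.length_cons]
    by_cases hx : v = x <;> by_cases hy : v = y <;> simp_all <;> omega

-- Boyer-Moore invariant
theorem pv_bm_inv (l : List String) : ∀ (st : Option String × Int), 0 ≤ st.2 →
    0 ≤ (l.foldl pvBmStep st).2 ∧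
    ∀ y : String, some y ≠ (l.foldl pvBmStep st).1 →
      2 * (l.count y : Int) + (l.foldl pvBmStep st).2 ≤
        (l.length : Int) + (if some y = st.1 then -st.2 else st.2) := by
  induction l with
  | nil =>
    intro st h0
    simp only [List.foldl_nil] at *
    refine ⟨h0, fun y hy => ?_⟩
    rw [if_neg hy]
    simp
  | cons v t ih =>
    intro st h0
    simp only [List.foldl_cons, List.count_cons, List.length_cons]
    by_cases h2 : st.2 = 0
    · have hst : pvBmStep st v = (some v, 1) := by simp [pvBmStep, h2]
      rw [hst]
      obtain ⟨hnn, hbd⟩ := ih (some v, 1) (by norm_num)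
      refine ⟨hnn, fun y hy => ?_⟩
      have H := hbd y hy
      rw [h2]; simp only [neg_zero, ite_self]
      by_cases hyv : y = v
      · rw [if_pos (by simp [hyv])]
        rw [if_pos (by rw [hyv])] at H
        push_cast at H ⊢; omega
      · rw [if_neg (by simp only [beq_iff_eq]; exact fun h => hyv h.symm)]
        rw [if_neg (by simpa using hyv)] at H
        push_cast at H ⊢; omega
    · by_cases hv : some v = st.1
      · have hst : pvBmStep st v = (st.1, st.2 + 1) := by simp [pvBmStep, h2, hv]
        rw [hst]
        obtain ⟨hnn, hbd⟩ := ih (st.1, st.2 + 1) (by omega)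
        refine ⟨hnn, fun y hy => ?_⟩
        have H := hbd y hy
        by_cases hyv : y = v
        · rw [if_pos (by simp [hyv])]
          rw [if_pos (hyv ▸ hv)] at H ⊢
          push_cast at H ⊢; omega
        · rw [if_neg (by simp only [beq_iff_eq]; exact fun h => hyv h.symm)]
          have hys : ¬ some y = st.1 := by rw [← hv]; simpa using hyv
          rw [if_neg hys] at H ⊢
          push_cast at H ⊢; omega
      · have hst : pvBmStep st v = (st.1, st.2 - 1) := by simp [pvBmStep, h2, hv]
        rw [hst]
        obtain ⟨hnn, hbd⟩ := ih (st.1, st.2 - 1) (by omega)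
        refine ⟨hnn, fun y hy => ?_⟩
        have H := hbd y hy
        by_cases hys : some y = st.1
        · have hyv : ¬ y = v := fun h => hv (h ▸ hys)
          rw [if_neg (by simp only [beq_iff_eq]; exact fun h => hyv h.symm)]
          rw [if_pos hys] at H ⊢
          push_cast at H ⊢; omega
        · rw [if_neg hys] at H ⊢
          by_cases hyv : y = v
          · rw [if_pos (by simp [hyv])]
            push_cast at H ⊢; omega
          · rw [if_neg (by simp only [beq_iff_eq]; exact fun h => hyv h.symm)]
            push_cast at H ⊢; omega

-- if some value has a strict majority, Boyer-Moore's final candidate is that value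
theorem pv_bm_majority (votes : List String) (x : String)
    (hx : (votes.length : Int) < 2 * (votes.count x : Int)) :
    (votes.foldl pvBmStep (none, 0)).1 = some x := by
  obtain ⟨hnn, hbd⟩ := pv_bm_inv votes (none, 0) le_rfl
  by_contra h
  have H := hbd x (fun he => h he.symm)
  rw [if_neg (by simp)] at H
  omega

-- the final candidate of a nonempty run is present
theorem pv_bm_some (l : List String) : ∀ st : Option String × Int, st.1.isSome →
    (l.foldl pvBmStep st).1.isSome := by
  induction l with
  | nil => intro st h; simpa using h
  | cons v t ih =>
    intro st h
    simp only [List.foldl_cons]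
    apply ih
    by_cases h2 : st.2 = 0
    · simp [pvBmStep, h2]
    · simp only [pvBmStep, if_neg h2]; split_ifs <;> exact h

theorem pv_count_mem (votes : List String) (x : String)
    (h : (votes.length : Int) < 2 * (votes.count x : Int)) : x ∈ votes := by
  refine List.count_pos_iff.mp ?_
  by_contra h0
  have : votes.count x = 0 := by omega
  rw [this] at h
  simp at h
  omega

theorem pv_mem_items (votes : List String) (x : String) (hx : x ∈ votes) :
    (x, (votes.count x : Int)) ∈ (PySem.Dict.counter votes).items := by
  rw [PySem.Dict.items_counter]
  exact List.mem_map_of_mem ((PySem.Set.mem_ofList _ _).mpr hx)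

theorem pv_items_count (votes : List String) (p : String × Int)
    (hp : p ∈ (PySem.Dict.counter votes).items) : p.2 = (votes.count p.1 : Int) := by
  rw [PySem.Dict.items_counter] at hp
  obtain ⟨k, _, hk⟩ := List.mem_map.mp hp
  rw [← hk]

theorem pv_len_ge_two (votes : List String) (hnil : votes ≠ [])
    (h1 : (PySem.Set.ofList votes).length ≠ 1) : 2 ≤ votes.length := by
  cases hu : PySem.Set.ofList votes with
  | nil =>
    exfalso
    cases votes with
    | nil => exact hnil rfl
    | cons v t =>
      have : v ∈ PySem.Set.ofList (v :: t) := (PySem.Set.mem_ofList _ _).mpr (by simp)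
      rw [hu] at this
      simp at this
  | cons a r =>
    cases r with
    | nil => exact absurd (by rw [hu]; rfl) h1
    | cons b r2 =>
      have hnd : (PySem.Set.ofList votes).Nodup := PySem.Set.nodup_ofList votes
      rw [hu] at hnd
      have hab : a ≠ b := by simp at hnd; tauto
      have ha : a ∈ votes := (PySem.Set.mem_ofList _ _).mp (by rw [hu]; simp)
      have hb : b ∈ votes := (PySem.Set.mem_ofList _ _).mp (by rw [hu]; simp)
      have hca : 0 < votes.count a := List.count_pos_iff.mpr ha
      have hcb : 0 < votes.count b := List.count_pos_iff.mpr hb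
      have := pv_count_add_count_le votes a b hab
      omega

theorem pv_uniq_one (votes : List String) (c : String)
    (hu : PySem.Set.ofList votes = [c]) : ∀ y ∈ votes, y = c := by
  intro y hy
  have : y ∈ PySem.Set.ofList votes := (PySem.Set.mem_ofList _ _).mpr hy
  rw [hu] at this
  simpa using this

theorem pv_decA_maj (votes : List String) (x : String) (hnil : votes ≠ [])
    (hmaj : (votes.length : Int) < 2 * (votes.count x : Int)) : pvDecA votes = some x := by
  have hxmem : x ∈ votes := pv_count_mem votes x hmaj
  unfold pvDecA
  rw [if_neg hnil]
  by_cases h1 : (PySem.Set.ofList votes).length = 1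
  · rw [if_pos h1]
    obtain ⟨c, hceq⟩ := List.length_eq_one_iff.mp h1
    have hx : x = c := pv_uniq_one votes c hceq x hxmem
    cases votes with
    | nil => exact absurd rfl hnil
    | cons v t =>
      have hv : v = c := pv_uniq_one _ c hceq v (by simp)
      have : PySem.List.pyGetD (v :: t) 0 "" = v := by
        simp [PySem.List.pyGetD, PySem.List.pyGet?, PySem.List.pyIdx?]
      rw [this, hv, hx]
  · rw [if_neg h1]
    cases hs : PySem.List.sorted (PySem.Dict.counter votes).items (fun p => p.2) true with
    | nil =>
      exfalso
      have := (PySem.List.sorted_eq_nil_iff _ _ _).mp hs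
      have hmem := pv_mem_items votes x hxmem
      rw [this] at hmem
      simp at hmem
    | cons p rest =>
      obtain ⟨lang, cnt⟩ := p
      have hmax : ∀ q ∈ (PySem.Dict.counter votes).items, q.2 ≤ cnt :=
        fun q hq => PySem.List.key_head_sorted_rev_ge _ _ hs q hq
      have hcx : (votes.count x : Int) ≤ cnt := hmax _ (pv_mem_items votes x hxmem)
      have hhead : (lang, cnt) ∈ (PySem.Dict.counter votes).items :=
        (PySem.List.mem_sorted _ _ _ _).mp (hs ▸ List.mem_cons_self)
      have hcnt : cnt = (votes.count lang : Int) := pv_items_count votes (lang, cnt) hhead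
      have hlx : lang = x := by
        by_contra hne
        have := pv_count_add_count_le votes lang x hne
        push_cast at hcnt
        omega
      have hlen2 : 2 ≤ votes.length := pv_len_ge_two votes hnil h1
      subst hlx
      show (if 2 ≤ cnt ∧ (votes.length : Int) - cnt < cnt then some lang else none) = some lang
      rw [if_pos (⟨by omega, by omega⟩ : 2 ≤ cnt ∧ (votes.length : Int) - cnt < cnt)]

theorem pv_decA_nomaj (votes : List String) (hnil : votes ≠ [])
    (hno : ∀ y : String, 2 * (votes.count y : Int) ≤ (votes.length : Int)) :
    pvDecA votes = none := by
  unfold pvDecA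
  rw [if_neg hnil]
  have h1 : (PySem.Set.ofList votes).length ≠ 1 := by
    intro h1
    obtain ⟨c, hceq⟩ := List.length_eq_one_iff.mp h1
    have hall : votes.count c = votes.length :=
      List.count_eq_length.mpr (fun b hb => by simpa [eq_comm] using pv_uniq_one votes c hceq b hb)
    have hlen : votes.length ≠ 0 := fun h => hnil (List.eq_nil_of_length_eq_zero h)
    have := hno c
    omega
  rw [if_neg h1]
  cases hs : PySem.List.sorted (PySem.Dict.counter votes).items (fun p => p.2) true with
  | nil => rfl
  | cons p rest =>
    obtain ⟨lang, cnt⟩ := p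
    have hhead : (lang, cnt) ∈ (PySem.Dict.counter votes).items :=
      (PySem.List.mem_sorted _ _ _ _).mp (hs ▸ List.mem_cons_self)
    have hcnt : cnt = (votes.count lang : Int) := pv_items_count votes (lang, cnt) hhead
    have := hno lang
    show (if 2 ≤ cnt ∧ (votes.length : Int) - cnt < cnt then some lang else none) = none
    rw [if_neg (fun hc : 2 ≤ cnt ∧ (votes.length : Int) - cnt < cnt => by omega)]

theorem pv_dec_eq (votes : List String) : pvDecA votes = pvDecB votes := by
  by_cases hnil : votes = []
  · simp [pvDecA, pvDecB, hnil]
  · have hsome : (votes.foldl pvBmStep (none, 0)).1.isSome := by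
      cases votes with
      | nil => exact absurd rfl hnil
      | cons v t =>
        simp only [List.foldl_cons]
        exact pv_bm_some t (pvBmStep (none, 0) v) (by simp [pvBmStep])
    obtain ⟨c, hc⟩ := Option.isSome_iff_exists.mp hsome
    have hB : pvDecB votes =
        if (votes.length : Int) < 2 * (votes.count c : Int) then some c else none := by
      unfold pvDecB
      rw [if_neg hnil, hc]
    by_cases hmaj : (votes.length : Int) < 2 * (votes.count c : Int)
    · rw [hB, if_pos hmaj, pv_decA_maj votes c hnil hmaj]
    · have hno : ∀ y : String, 2 * (votes.count y : Int) ≤ (votes.length : Int) := by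
        intro y
        by_contra hy
        have : (votes.foldl pvBmStep (none, 0)).1 = some y := pv_bm_majority votes y (by omega)
        rw [hc] at this
        have : y = c := by simpa using this.symm
        subst this
        omega
      rw [hB, if_neg hmaj, pv_decA_nomaj votes hnil hno]

theorem vote_lang_by_yaml_spec : Claim_equal_vote_lang_by_yaml := by
  intro artists artist_map _
  unfold Spec_vote_lang_by_yaml
  rw [pvDecA_eq, pvDecB_eq, pv_dec_eq]
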